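-- pv_equiv track=rewrite | github.com/jnoms/SAT | sat/scripts/struc_find_motif.py | generate_motif_options
-- ===== SOURCE A (Python) =====
-- def generate_motif_options(motif, AAs="ARNDBCEQZGHILKMFPSTWYV"):
--     in_options = False
--     pos = 0
--     pos_options = dict()
--     for c in motif:
--         if c == "[":
--             in_options = True
--             pos += 1
--             continue
--
--         if c == "]":
--             in_options = False
--             continue
--
--         if in_options:
--             c = c.upper()
--             if pos not in pos_options:
--                 pos_options[pos] = set()
--             pos_options[pos].add(c)
--
--         if not in_options:
--             pos += 1
--             if pos not in pos_options:
--                 pos_options[pos] = set()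
--             if c.lower() != "x":
--                 c = c.upper()
--                 pos_options[pos].add(c)
--             else:
--                 for AA in AAs:
--                     pos_options[pos].add(AA)
--
--     return pos_options
-- ===== SOURCE B (Python) =====
-- def generate_motif_options(motif, AAs="ARNDBCEQZGHILKMFPSTWYV"):
--     # Scan bracket groups as whole tokens instead of a per-char in_options state machine.
--     pos_options = {}
--     pos = 0
--     i = 0
--     n = len(motif)
--     while i < n:
--         c = motif[i]
--         if c == "]":
--             i += 1
--             continue
--         pos += 1
--         if c == "[":
--             j = i + 1
--             while j < n and motif[j] != "[" and motif[j] != "]":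
--                 j += 1
--             inner = motif[i + 1:j]
--             i = j + 1 if (j < n and motif[j] == "]") else j
--             if inner:
--                 pos_options[pos] = pos_options.get(pos, set()) | {ch.upper() for ch in inner}
--         else:
--             i += 1
--             pos_options[pos] = pos_options.get(pos, set()) | (set(AAs) if c.lower() == "x" else {c.upper()})
--     return pos_options
-- ===== Notes on version B (the rewrite author's own statement) =====
-- stated objective: alternative
-- what changed: Replaces A's per-character in_options boolean state machine with a tokenizing scan that consumes each bracket group (inner run plus optional closing bracket) as one whole token and writes each position's option set with a single dict assignment.
import Mathlib
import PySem

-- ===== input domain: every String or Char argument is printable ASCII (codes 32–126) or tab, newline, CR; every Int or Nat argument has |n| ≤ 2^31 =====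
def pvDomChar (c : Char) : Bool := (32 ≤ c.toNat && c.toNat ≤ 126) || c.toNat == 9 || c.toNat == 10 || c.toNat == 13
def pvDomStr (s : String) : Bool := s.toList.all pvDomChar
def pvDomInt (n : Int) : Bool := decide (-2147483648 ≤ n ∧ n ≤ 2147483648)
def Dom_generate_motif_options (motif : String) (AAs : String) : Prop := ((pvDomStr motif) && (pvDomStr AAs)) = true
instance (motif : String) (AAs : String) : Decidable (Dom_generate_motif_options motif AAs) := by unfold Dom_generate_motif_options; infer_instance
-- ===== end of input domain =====

-- B replaces A's per-character in_options state machine by a scan that consumes each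
-- bracket group as one whole token (objective: alternative decomposition, same cost).

-- c.upper() / c.lower() on a one-character string (shared by both ports)
def pvUp1 (c : Char) : String := PySem.Str.upper (String.singleton c)
def pvLow1 (c : Char) : String := PySem.Str.lower (String.singleton c)

-- ===== PORT A =====
-- one iteration of A's for-loop; state = (in_options, pos, pos_options)
def aStep (AAs : List Char) :
    (Bool × Int × PySem.Dict Int (PySem.Set String)) → Char →
    (Bool × Int × PySem.Dict Int (PySem.Set String))
  | (inOpt, pos, d), c =>
    if c = '[' then (true, pos + 1, d)
    else if c = ']' then (false, pos, d)
    else if inOpt then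
      -- if pos not in pos_options: pos_options[pos] = set(); pos_options[pos].add(c.upper())
      let d1 := if d.contains pos then d else d.insert pos PySem.Set.empty
      (true, pos, d1.modify pos PySem.Set.empty (fun s => s.add (pvUp1 c)))
    else
      let pos' := pos + 1
      let d1 := if d.contains pos' then d else d.insert pos' PySem.Set.empty
      if pvLow1 c ≠ "x" then
        (false, pos', d1.modify pos' PySem.Set.empty (fun s => s.add (pvUp1 c)))
      else
        (false, pos', AAs.foldl (fun dd a => dd.modify pos' PySem.Set.empty (fun s => s.add (String.singleton a))) d1)

def generate_motif_options (motif : String) (AAs : String) : List (Int × List String) :=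
  ((motif.toList.foldl (aStep AAs.toList) (false, 0, PySem.Dict.empty)).2.2).items

-- ===== PORT B =====
-- a char that belongs to the inside of a bracket group
def pvNb (c : Char) : Bool := c != '[' && c != ']'

-- remainder of the string after a bracket group: drop the inner chars and one closing ']' if present
def pvGroupRest (l : List Char) : List Char :=
  match l.dropWhile pvNb with
  | [] => []
  | c :: t => if c = ']' then t else c :: t

-- dict update done for one bracket group whose inner chars are l.takeWhile pvNb
def pvGroupDict (l : List Char) (pos : Int) (d : PySem.Dict Int (PySem.Set String)) :
    PySem.Dict Int (PySem.Set String) :=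
  let inner := l.takeWhile pvNb
  if inner.isEmpty then d
  else d.insert pos (PySem.Set.union (d.getD pos PySem.Set.empty) (PySem.Set.ofList (inner.map pvUp1)))

lemma pvGroupRest_length_le (l : List Char) : (pvGroupRest l).length ≤ l.length := by
  have hd := l.length_dropWhile_le pvNb
  unfold pvGroupRest
  cases h : l.dropWhile pvNb with
  | nil => simp
  | cons a t =>
    rw [h] at hd
    simp only [List.length_cons] at hd
    show (if a = ']' then t else a :: t).length ≤ l.length
    by_cases ha : a = ']'
    · rw [if_pos ha]; omega
    · rw [if_neg ha]; simp only [List.length_cons]; omega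

-- B's scan: one step per token (stray ']', bracket group, or plain character)
def altLoop (AAs : List Char) :
    List Char → Int → PySem.Dict Int (PySem.Set String) → PySem.Dict Int (PySem.Set String)
  | [], _, d => d
  | c :: rest, pos, d =>
    if c = ']' then altLoop AAs rest pos d
    else if c = '[' then
      altLoop AAs (pvGroupRest rest) (pos + 1) (pvGroupDict rest (pos + 1) d)
    else
      altLoop AAs rest (pos + 1)
        (d.insert (pos + 1) (PySem.Set.union (d.getD (pos + 1) PySem.Set.empty)
          (if pvLow1 c = "x" then PySem.Set.ofList (AAs.map String.singleton)
           else PySem.Set.ofList [pvUp1 c])))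
  termination_by l _ _ => l.length
  decreasing_by
    · simp
    · have := pvGroupRest_length_le rest; simp; omega
    · simp

def generate_motif_options_alt (motif : String) (AAs : String) : List (Int × List String) :=
  (altLoop AAs.toList motif.toList 0 PySem.Dict.empty).items

-- ===== PRECONDITION & SPEC =====
def Spec_generate_motif_options (motif : String) (AAs : String) (out : List (Int × List String)) : Prop := out = generate_motif_options_alt motif AAs
instance (motif : String) (AAs : String) (out : List (Int × List String)) : Decidable (Spec_generate_motif_options motif AAs out) := by unfold Spec_generate_motif_options; infer_instance

-- ===== CLAIM (what is proved, stated in full; the proofs are below) =====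
def Claim_equal_generate_motif_options : Prop := ∀ (motif : String) (AAs : String), Dom_generate_motif_options motif AAs → Spec_generate_motif_options motif AAs (generate_motif_options motif AAs)

-- ===== LEMMAS AND PROOFS =====

-- a dict with unique keys is unchanged by re-inserting the value already stored at a present key
lemma dict_insert_getD_self {κ ν : Type} [BEq κ] [LawfulBEq κ]
    (d : PySem.Dict κ ν) (k : κ) (dflt : ν)
    (hc : d.contains k = true) (hn : d.keys.Nodup) :
    d.insert k (d.getD k dflt) = d := by
  unfold PySem.Dict.insert
  rw [if_pos hc]
  cases d with
  | mk items =>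
    congr 1
    have h : ∀ p ∈ items, (if (p.1 == k) = true then (k, (PySem.Dict.mk items).getD k dflt) else p) = id p := by
      intro p hp
      by_cases hk : (p.1 == k) = true
      · have hpk : p.1 = k := eq_of_beq hk
        have hmem : (k, p.2) ∈ (PySem.Dict.mk items).items := by
          simpa [← hpk] using hp
        have hget := PySem.Dict.get?_of_mem_items _ hmem hn
        have hgd : (PySem.Dict.mk items).getD k dflt = p.2 :=
          PySem.Dict.getD_of_get?_eq_some _ dflt hget
        rw [if_pos hk, ← hpk] at *
        exact Prod.ext rfl hgd
      · simp [hk]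
    rw [List.map_congr_left h, List.map_id]

-- A's "ensure the key exists, then mutate d[k]" collapses to a single insert
lemma ensure_modify {κ ν : Type} [BEq κ] [LawfulBEq κ]
    (d : PySem.Dict κ ν) (k : κ) (e : ν) (f : ν → ν) :
    ((if d.contains k then d else d.insert k e).modify k e f) = d.insert k (f (d.getD k e)) := by
  cases hc : d.contains k with
  | true => simp [PySem.Dict.modify]
  | false =>
    simp only [Bool.false_eq_true, if_false, PySem.Dict.modify,
      PySem.Dict.getD_insert_self, PySem.Dict.insert_insert_self,
      PySem.Dict.getD_of_not_contains d e hc]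

-- A's x-loop: repeatedly mutating d[k] is one insert of the accumulated set
lemma foldl_modify {κ β : Type} [BEq κ] [LawfulBEq κ]
    (f : β → String) (k : κ) :
    ∀ (l : List β) (d : PySem.Dict κ (PySem.Set String)),
      d.contains k = true → d.keys.Nodup →
      l.foldl (fun dd a => dd.modify k PySem.Set.empty (fun s => s.add (f a))) d
        = d.insert k (PySem.Set.update (d.getD k PySem.Set.empty) (l.map f)) := by
  intro l
  induction l with
  | nil =>
    intro d hc hn
    simp [PySem.Set.update, dict_insert_getD_self d k _ hc hn]
  | cons a l ih =>
    intro d hc hn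
    simp only [List.foldl_cons, List.map_cons]
    rw [show d.modify k PySem.Set.empty (fun s => s.add (f a))
        = d.insert k ((d.getD k PySem.Set.empty).add (f a)) from rfl]
    rw [ih _ (PySem.Dict.contains_insert_self d k _) (PySem.Dict.nodup_keys_insert d k _ hn)]
    rw [PySem.Dict.getD_insert_self, PySem.Dict.insert_insert_self, PySem.Set.update_cons]

-- ensure + x-loop together
lemma ensure_foldl {κ β : Type} [BEq κ] [LawfulBEq κ]
    (f : β → String) (k : κ) (l : List β)
    (d : PySem.Dict κ (PySem.Set String)) (hn : d.keys.Nodup) :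
    l.foldl (fun dd a => dd.modify k PySem.Set.empty (fun s => s.add (f a)))
        (if d.contains k then d else d.insert k PySem.Set.empty)
      = d.insert k (PySem.Set.update (d.getD k PySem.Set.empty) (l.map f)) := by
  cases hc : d.contains k with
  | true => simpa using foldl_modify f k l d hc hn
  | false =>
    rw [if_neg (by simp)]
    rw [foldl_modify f k l _ (PySem.Dict.contains_insert_self d k _)
      (PySem.Dict.nodup_keys_insert d k _ hn)]
    rw [PySem.Dict.getD_insert_self, PySem.Dict.insert_insert_self,
      PySem.Dict.getD_of_not_contains d _ hc]

-- updating with a set built from a list is updating with the list itself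
lemma set_update_ofList {α : Type} [BEq α] [LawfulBEq α] (s : PySem.Set α) (L : List α) :
    PySem.Set.update s (PySem.Set.ofList L) = PySem.Set.update s L := by
  rw [PySem.Set.update_eq_append_filter s (PySem.Set.ofList L),
      PySem.Set.update_eq_append_filter s L, PySem.Set.ofList_ofList]

-- unfolding equations for B's scan
lemma altLoop_nil (A : List Char) (pos : Int) (d : PySem.Dict Int (PySem.Set String)) :
    altLoop A [] pos d = d := by
  rw [altLoop.eq_def]

lemma altLoop_cons (A : List Char) (c : Char) (rest : List Char) (pos : Int)
    (d : PySem.Dict Int (PySem.Set String)) :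
    altLoop A (c :: rest) pos d =
      if c = ']' then altLoop A rest pos d
      else if c = '[' then
        altLoop A (pvGroupRest rest) (pos + 1) (pvGroupDict rest (pos + 1) d)
      else
        altLoop A rest (pos + 1)
          (d.insert (pos + 1) (PySem.Set.union (d.getD (pos + 1) PySem.Set.empty)
            (if pvLow1 c = "x" then PySem.Set.ofList (A.map String.singleton)
             else PySem.Set.ofList [pvUp1 c]))) := by
  rw [altLoop.eq_def]

-- the main invariant: A's fold from either flag state equals B's token scan
lemma main_inv (A : List Char) (n : Nat) :
    ∀ l : List Char, l.length ≤ n → ∀ (pos : Int) (d : PySem.Dict Int (PySem.Set String)),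
      d.keys.Nodup →
      ((l.foldl (aStep A) (false, pos, d)).2.2 = altLoop A l pos d ∧
       (l.foldl (aStep A) (true, pos, d)).2.2
         = altLoop A (pvGroupRest l) pos (pvGroupDict l pos d)) := by
  induction n with
  | zero =>
    intro l hl pos d hn
    have hl0 : l = [] := List.length_eq_zero_iff.mp (Nat.le_zero.mp hl)
    subst hl0
    exact ⟨(altLoop_nil A pos d).symm,
      by simp [pvGroupRest, pvGroupDict, altLoop_nil]⟩
  | succ n ih =>
    intro l hl pos d hn
    cases l with
    | nil =>
      exact ⟨(altLoop_nil A pos d).symm,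
        by simp [pvGroupRest, pvGroupDict, altLoop_nil]⟩
    | cons c rest =>
      have hr : rest.length ≤ n := by simp at hl; omega
      by_cases h1 : c = '['
      · subst h1
        constructor
        · have hstep : aStep A (false, pos, d) '[' = (true, pos + 1, d) := by simp [aStep]
          rw [List.foldl_cons, hstep, (ih rest hr (pos + 1) d hn).2,
            altLoop_cons, if_neg (by decide : ¬('[' = ']')), if_pos rfl]
        · have hstep : aStep A (true, pos, d) '[' = (true, pos + 1, d) := by simp [aStep]
          rw [List.foldl_cons, hstep, (ih rest hr (pos + 1) d hn).2]
          have hgr : pvGroupRest ('[' :: rest) = '[' :: rest := by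
            simp [pvGroupRest, pvNb]
          have hgd : pvGroupDict ('[' :: rest) pos d = d := by
            simp [pvGroupDict, pvNb]
          rw [hgr, hgd, altLoop_cons, if_neg (by decide : ¬('[' = ']')), if_pos rfl]
      · by_cases h2 : c = ']'
        · subst h2
          constructor
          · have hstep : aStep A (false, pos, d) ']' = (false, pos, d) := by simp [aStep]
            rw [List.foldl_cons, hstep, (ih rest hr pos d hn).1,
              altLoop_cons, if_pos rfl]
          · have hstep : aStep A (true, pos, d) ']' = (false, pos, d) := by simp [aStep]
            rw [List.foldl_cons, hstep, (ih rest hr pos d hn).1]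
            have hgr : pvGroupRest (']' :: rest) = rest := by
              simp [pvGroupRest, pvNb]
            have hgd : pvGroupDict (']' :: rest) pos d = d := by
              simp [pvGroupDict, pvNb]
            rw [hgr, hgd]
        · -- plain character
          have hnb : pvNb c = true := by simp [pvNb, h1, h2]
          constructor
          · by_cases hx : pvLow1 c = "x"
            · have hstep : aStep A (false, pos, d) c
                  = (false, pos + 1, d.insert (pos + 1)
                      (PySem.Set.update (d.getD (pos + 1) PySem.Set.empty)
                        (A.map String.singleton))) := by
                simp only [aStep, if_neg h1, if_neg h2, Bool.false_eq_true, if_false, hx,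
                  ne_eq, not_true_eq_false]
                rw [ensure_foldl String.singleton (pos + 1) A d hn]
              rw [List.foldl_cons, hstep,
                (ih rest hr (pos + 1) _ (PySem.Dict.nodup_keys_insert d _ _ hn)).1,
                altLoop_cons, if_neg h2, if_neg h1, if_pos hx,
                show PySem.Set.union (d.getD (pos + 1) PySem.Set.empty)
                    (PySem.Set.ofList (A.map String.singleton))
                  = PySem.Set.update (d.getD (pos + 1) PySem.Set.empty)
                      (PySem.Set.ofList (A.map String.singleton)) from rfl,
                set_update_ofList (d.getD (pos + 1) PySem.Set.empty) (A.map String.singleton)]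
            · have hstep : aStep A (false, pos, d) c
                  = (false, pos + 1, d.insert (pos + 1)
                      ((d.getD (pos + 1) PySem.Set.empty).add (pvUp1 c))) := by
                simp only [aStep, if_neg h1, if_neg h2, Bool.false_eq_true, if_false,
                  ne_eq, hx, not_false_eq_true, if_true]
                rw [ensure_modify d (pos + 1) PySem.Set.empty (fun s => s.add (pvUp1 c))]
              rw [List.foldl_cons, hstep,
                (ih rest hr (pos + 1) _ (PySem.Dict.nodup_keys_insert d _ _ hn)).1,
                altLoop_cons, if_neg h2, if_neg h1, if_neg hx,
                show PySem.Set.union (d.getD (pos + 1) PySem.Set.empty)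
                    (PySem.Set.ofList [pvUp1 c])
                  = (d.getD (pos + 1) PySem.Set.empty).add (pvUp1 c) from rfl]
          · have hstep : aStep A (true, pos, d) c
                = (true, pos, d.insert pos
                    ((d.getD pos PySem.Set.empty).add (pvUp1 c))) := by
              simp only [aStep, if_neg h1, if_neg h2, if_true]
              rw [ensure_modify d pos PySem.Set.empty (fun s => s.add (pvUp1 c))]
            rw [List.foldl_cons, hstep,
              (ih rest hr pos _ (PySem.Dict.nodup_keys_insert d _ _ hn)).2]
            have hgr : pvGroupRest (c :: rest) = pvGroupRest rest := by
              simp [pvGroupRest, hnb]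
            have hkey : pvGroupDict rest pos
                  (d.insert pos ((d.getD pos PySem.Set.empty).add (pvUp1 c)))
                = pvGroupDict (c :: rest) pos d := by
              unfold pvGroupDict
              cases htw : rest.takeWhile pvNb with
              | nil =>
                simp only [htw, List.takeWhile_cons, hnb, if_true, List.isEmpty_nil,
                  List.isEmpty_cons, Bool.false_eq_true, if_false, List.map_cons,
                  List.map_nil]
                rfl
              | cons a t =>
                simp only [htw, List.takeWhile_cons, hnb, if_true, List.isEmpty_cons,
                  Bool.false_eq_true, if_false, List.map_cons]
                rw [PySem.Dict.getD_insert_self, PySem.Dict.insert_insert_self]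
                congr 1
                show PySem.Set.update _ _ = PySem.Set.update _ _
                rw [set_update_ofList, set_update_ofList]
                simp only [PySem.Set.update_cons]
            rw [hgr, hkey]

-- ===== VERDICT (by name: the statement is the Claim_ definition above) =====
theorem generate_motif_options_spec : Claim_equal_generate_motif_options := by
  intro motif AAs _
  unfold Spec_generate_motif_options generate_motif_options generate_motif_options_alt
  have h := (main_inv AAs.toList motif.toList.length motif.toList le_rfl 0 PySem.Dict.empty
    (by simp [PySem.Dict.keys_empty])).1
  rw [h]
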